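-- pv_equiv track=rewrite | github.com/schneiderdies/HOMEWORK | 71.py | func
-- ===== SOURCE A (Python) =====
-- def func(a, b, c):
--     sum_true = 0
--     sum_false = 0
--     if c:
--         for i in range(a, b + 1):
--             if i % 2 == 0:
--                 sum_true += 1
--         return sum_true
--     elif not c:
--         for i in range(a, b + 1):
--             if i % 2 != 0:
--                 sum_false += i
--         return sum_false
-- ===== SOURCE B (Python) =====
-- def func(a, b, c):
--     if c:
--         # number of even integers in [a, b], closed form
--         if a > b:
--             return 0
--         return b // 2 - (a - 1) // 2
--     else:
--         # sum of odd integers in [a, b] via arithmetic series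
--         f = a if a % 2 != 0 else a + 1
--         l = b if b % 2 != 0 else b - 1
--         if f > l:
--             return 0
--         return ((l - f) // 2 + 1) * (f + l) // 2
-- ===== Notes on version B (the rewrite author's own statement) =====
-- stated objective: faster
-- what changed: Replaces the O(b-a) loop over range(a,b+1) with O(1) closed-form arithmetic: floor-division even count and an arithmetic-series sum of odds.
import Mathlib
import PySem

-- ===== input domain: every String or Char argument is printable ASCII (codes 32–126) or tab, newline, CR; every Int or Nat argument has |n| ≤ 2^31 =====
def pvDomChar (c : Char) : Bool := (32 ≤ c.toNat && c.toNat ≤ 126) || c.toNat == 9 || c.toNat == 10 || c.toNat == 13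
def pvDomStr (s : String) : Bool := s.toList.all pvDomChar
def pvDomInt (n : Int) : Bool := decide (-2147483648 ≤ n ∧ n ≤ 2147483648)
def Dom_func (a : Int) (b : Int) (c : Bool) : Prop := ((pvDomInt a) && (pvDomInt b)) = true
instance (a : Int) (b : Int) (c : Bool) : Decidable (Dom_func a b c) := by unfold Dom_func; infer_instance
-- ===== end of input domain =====

-- B replaces A's O(b-a) loop with O(1) closed-form arithmetic (floor-division even count / arithmetic-series odd sum).

-- ===== PORT A =====
-- literal port: loop over range(a, b+1); count evens if c, else sum odds
def func (a : Int) (b : Int) (c : Bool) : Int :=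
  if c then
    (PySem.List.pyRange a (b + 1) 1).foldl
      (fun sum_true i => if PySem.Int.mod i 2 = 0 then sum_true + 1 else sum_true) 0
  else
    (PySem.List.pyRange a (b + 1) 1).foldl
      (fun sum_false i => if PySem.Int.mod i 2 ≠ 0 then sum_false + i else sum_false) 0

-- ===== PORT B =====
def func_alt (a : Int) (b : Int) (c : Bool) : Int :=
  if c then
    if a > b then 0
    else PySem.Int.floordiv b 2 - PySem.Int.floordiv (a - 1) 2
  else
    let f := if PySem.Int.mod a 2 ≠ 0 then a else a + 1
    let l := if PySem.Int.mod b 2 ≠ 0 then b else b - 1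
    if f > l then 0
    else PySem.Int.floordiv ((PySem.Int.floordiv (l - f) 2 + 1) * (f + l)) 2

-- ===== PRECONDITION & SPEC =====
def Spec_func (a : Int) (b : Int) (c : Bool) (out : Int) : Prop := out = func_alt a b c
instance (a : Int) (b : Int) (c : Bool) (out : Int) : Decidable (Spec_func a b c out) := by unfold Spec_func; infer_instance

-- ===== CLAIM (what is proved, stated in full; the proofs are below) =====
def Claim_equal_func : Prop := ∀ (a : Int) (b : Int) (c : Bool), Dom_func a b c → Spec_func a b c (func a b c)

-- ===== LEMMAS AND PROOFS =====

-- prefix sum of odd integers: pvT x = sum of odd k with 0 ≤ k ≤ x minus sum of odd k with x < k < 0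
def pvT (x : Int) : Int := ((x + 1) / 2) * ((x + 1) / 2)

theorem pvT_step (a : Int) : pvT a - pvT (a - 1) = if a % 2 ≠ 0 then a else 0 := by
  unfold pvT
  rcases Int.even_or_odd a with ⟨q, hq⟩ | ⟨q, hq⟩
  · have h1 : (a + 1) / 2 = q := by omega
    have h2 : (a - 1 + 1) / 2 = q := by omega
    have h3 : a % 2 = 0 := by omega
    rw [h1, h2, h3]; simp
  · have h1 : (a + 1) / 2 = q + 1 := by omega
    have h2 : (a - 1 + 1) / 2 = q := by omega
    have h3 : a % 2 ≠ 0 := by omega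
    rw [h1, h2, if_pos h3]; nlinarith [hq]

theorem pvT_even (a : Int) (h : a % 2 = 0) : pvT a = pvT (a - 1) := by
  have := pvT_step a
  rw [if_neg (by omega)] at this
  omega

-- A's even-count loop, arbitrary accumulator
theorem even_loop (n : Nat) : ∀ (a s : Int),
    (PySem.List.pyRange a (a + n) 1).foldl
      (fun t i => if PySem.Int.mod i 2 = 0 then t + 1 else t) s
    = s + ((a + n - 1) / 2 - (a - 1) / 2) := by
  induction n with
  | zero =>
    intro a s
    rw [PySem.List.pyRange_one_eq_nil (by omega)]
    simp
  | succ n ih =>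
    intro a s
    rw [PySem.List.pyRange_one_cons (by push_cast; omega)]
    simp only [List.foldl_cons]
    have hre : a + ((n : Int) + 1) = (a + 1) + n := by ring
    push_cast
    rw [hre, ih (a + 1)]
    rw [PySem.Int.mod_eq_emod_of_pos (show (0:Int) < 2 by omega)]
    split_ifs with h <;> omega

-- A's odd-sum loop, arbitrary accumulator
theorem odd_loop (n : Nat) : ∀ (a s : Int),
    (PySem.List.pyRange a (a + n) 1).foldl
      (fun t i => if i % 2 ≠ 0 then t + i else t) s
    = s + (pvT (a + n - 1) - pvT (a - 1)) := by
  induction n with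
  | zero =>
    intro a s
    rw [PySem.List.pyRange_one_eq_nil (by omega)]
    simp
  | succ n ih =>
    intro a s
    rw [PySem.List.pyRange_one_cons (by push_cast; omega)]
    simp only [List.foldl_cons]
    have hre : a + ((n : Int) + 1) = (a + 1) + n := by ring
    push_cast
    rw [hre, ih (a + 1)]
    have hs := pvT_step a
    have hca : (a + 1) - 1 = a := by ring
    rw [hca]
    split_ifs with h
    · rw [if_pos h] at hs; omega
    · rw [if_neg h] at hs; omega

-- arithmetic-series formula for the sum of odds from f to l (both odd)
theorem odd_series (f l : Int) (hf : f % 2 = 1) (hl : l % 2 = 1) (hfl : f ≤ l) :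
    ((l - f) / 2 + 1) * (f + l) / 2 = pvT l - pvT (f - 1) := by
  obtain ⟨u, hu⟩ : ∃ u, f = 2 * u + 1 := ⟨(f - 1) / 2, by omega⟩
  obtain ⟨v, hv⟩ : ∃ v, l = 2 * v + 1 := ⟨(l - 1) / 2, by omega⟩
  have h1 : (l - f) / 2 = v - u := by omega
  have h2 : (v - u + 1) * (f + l) = 2 * ((v - u + 1) * (u + v + 1)) := by
    subst hu hv; ring
  rw [h1, h2, Int.mul_ediv_cancel_left _ (by norm_num)]
  unfold pvT
  have h3 : (l + 1) / 2 = v + 1 := by omega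
  have h4 : (f - 1 + 1) / 2 = u := by omega
  rw [h3, h4]
  ring

-- ===== VERDICT (by name: the statement is the Claim_ definition above) =====
theorem func_spec : Claim_equal_func := by
  intro a b c _
  unfold Spec_func func func_alt
  have h2 : (0 : Int) < 2 := by omega
  cases c
  · -- odd-sum branch
    rw [if_neg (by simp), if_neg (by simp)]
    simp only [PySem.Int.mod_eq_emod_of_pos h2, PySem.Int.floordiv_eq_ediv_of_pos h2]
    by_cases hab : a ≤ b
    · obtain ⟨n, hn⟩ : ∃ n : Nat, b + 1 = a + n := ⟨(b + 1 - a).toNat, by omega⟩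
      rw [hn, odd_loop n a 0]
      have hab1 : a + (n : Int) - 1 = b := by omega
      rw [hab1, zero_add]
      have e1 : a + 1 - 1 = a := by ring
      by_cases ha : a % 2 = 0 <;> by_cases hb : b % 2 = 0
      · -- a even, b even: f = a + 1, l = b - 1
        rw [if_neg (show ¬ (a % 2 ≠ 0) by omega), if_neg (show ¬ (b % 2 ≠ 0) by omega)]
        by_cases heq : b = a
        · rw [if_pos (by omega)]
          rw [heq, pvT_even a ha]; ring
        · rw [if_neg (show ¬ (a + 1 > b - 1) by omega)]
          rw [odd_series (a + 1) (b - 1) (by omega) (by omega) (by omega)]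
          rw [e1, pvT_even a ha, pvT_even b hb]
      · -- a even, b odd: f = a + 1, l = b
        rw [if_neg (show ¬ (a % 2 ≠ 0) by omega), if_pos (show b % 2 ≠ 0 by omega)]
        rw [if_neg (show ¬ (a + 1 > b) by omega)]
        rw [odd_series (a + 1) b (by omega) (by omega) (by omega)]
        rw [e1, pvT_even a ha]
      · -- a odd, b even: f = a, l = b - 1
        rw [if_pos (show a % 2 ≠ 0 by omega), if_neg (show ¬ (b % 2 ≠ 0) by omega)]
        rw [if_neg (show ¬ (a > b - 1) by omega)]
        rw [odd_series a (b - 1) (by omega) (by omega) (by omega)]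
        rw [pvT_even b hb]
      · -- a odd, b odd: f = a, l = b
        rw [if_pos (show a % 2 ≠ 0 by omega), if_pos (show b % 2 ≠ 0 by omega)]
        rw [if_neg (show ¬ (a > b) by omega)]
        rw [odd_series a b (by omega) (by omega) (by omega)]
    · -- empty range: loop returns 0; B's guard f > l fires
      rw [PySem.List.pyRange_one_eq_nil (by omega), List.foldl_nil]
      have hfl : (if a % 2 ≠ 0 then a else a + 1) > (if b % 2 ≠ 0 then b else b - 1) := by
        split_ifs <;> omega
      rw [if_pos hfl]
  · -- even-count branch
    rw [if_pos rfl, if_pos rfl]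
    simp only [PySem.Int.floordiv_eq_ediv_of_pos h2]
    by_cases hab : a > b
    · rw [if_pos hab, PySem.List.pyRange_one_eq_nil (by omega), List.foldl_nil]
    · rw [if_neg hab]
      obtain ⟨n, hn⟩ : ∃ n : Nat, b + 1 = a + n := ⟨(b + 1 - a).toNat, by omega⟩
      rw [hn, even_loop n a 0]
      omega
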